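/- GENERATED by mk_final_copies.py from the proof of the farm's unit `start_decoder.R12b` (farm:start_decoder.R12b.1: Proof.lean) as the
   re-elaboration sweep compiled it — do not edit. -/
import Asan.CheckWalk
import Vorbis.Spec.Reader
import Vorbis.Spec.Units.start_decoder_R12b

open X86 X86.User Asan Vorbis Vorbis.Spec Vorbis.Spec.StartDecoder

set_option maxRecDepth 4000
set_option maxHeartbeats 4000000

namespace Vorbis.Spec.start_decoder_R12b

/-- **Segment R12b of `start_decoder`** (`cut305` 0x11648f … 0x116497, returns into `cut306` 0x11649c): the second `get_bits(f, 8)` of a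
round of the submap loop. THE TEMPLATE OF A READER CALL INSIDE R10 … R12: the loop record by `MapLoop.carry` (every window a `MapWin`:
the stack below the steady rsp, the reader's fields of `*f`), `Bits` from the reader's post; the own clauses of `InR12` — `rbx` and
`lt` by `MapLoop.fields_eq`, the record under construction by `MapCur.carry` (no window meets the arena's buffer: the record and the
`chan` block read the same), the prefix of MP6 from the record's bytes and `floor_count` / `residue_count` (`MapLoop.objEq`). -/
theorem segR12b_walk {Lay : Layout} (hLay : Lay.hi = 0x1000000) {μ : Microarch} (hμ : UserX.MicroOK μ) {u₀ : State}
    (hcode : HasCodeNat Lay u₀ Vorbis.L.start_decoder.entry Vorbis.Code.code_start_decoder.nat Vorbis.L.start_decoder.size)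
    (h_get_bits : ∀ (others : List Obj) (frames : List (Nat × FrameLayout)) (Blk : Block → Prop) (len : Nat),
      Calls Lay μ Vorbis.WayInv (Vorbis.conv u₀) Vorbis.L.get_bits.entry (Vorbis.Spec.get_bits.spec others frames Blk len))
    {g : Ghost} {i j : Nat} {v : State} {A7 A7c Ai : Arena} {A : Arena × List Obj}
    (hb : BodyR12m u₀ g Vorbis.L.start_decoder.cut305 i j A7 A7c Ai A v) :
    ReachVia Lay μ WayInv v (fun w => AtR12b u₀ g i j w) := by
  have hpt := hb.pt
  have hl := hpt.loop
  have hcur := hpt.cur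
  have hfr := hl.frame
  have hh := hl.hand
  have hm := hl.mid
  have hp : Pos g A := hl.secPt.pos
  have he := hfr.entry
  v_entry he
  obtain ⟨hRa, hR8⟩ := hfr.r_eq
  simp only [steady, Ghost.RA] at hRa
  simp only [depth] at he_room he_stack
  have hflo := hp.f_lo
  have hf2 := hp.f_hi
  have hf3 := hp.f_stack
  simp only [Ghost.RA] at hf3
  have hRn : (addr g.R).toNat = g.R := toNat_addr _ (by omega)
  have hfn : (addr g.f).toNat = g.f := toNat_addr _ (by omega)
  have w_rip := hfr.rip
  have c_rsp := hfr.rsp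
  have c_rbp := hl.rbp
  have w_eq : Mem.EqOn Vorbis.L.textLo Vorbis.L.textHi u₀.mem v.mem := hfr.code
  have hdf : v.flags .df = false := (show abiInv _ from hfr.inv).1
  have hmx : v.mxcsr &&& 0x1F80 = 0x1F80 := (show abiInv _ from hfr.inv).2
  have hsse := Vorbis.sseOK_of_abiInv hfr.inv
  have hgb := h_get_bits A.2 g.frames' (g.Blk A) g.len
  u_walk hcode [hμ.vendor] until [Vorbis.L.start_decoder.cut306] span [Vorbis.L.textLo, Vorbis.L.textHi] side (v_side)
  case call_inv => v_inv
  case pre_116497 =>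
    have hun : ShadowUntouched v.mem s_116497.mem := by v_untouched
    have hs0 : Mem.SameExcept [⟨g.R - 8, g.R⟩] v.mem s_116497.mem := by u_same
    have hbits := (Vorbis.Spec.Reader.reader_of_window hm.bits hs0 (by omega)).1
    refine ⟨⟨shadowPre_call hfr (by rw [w_rsp]; u_omega) hun, ?_, ?_⟩, ?_⟩
    · rw [w_rdi, hfn]
      exact readerEnv_mid hh hm
    · rw [w_rdi, hfn]
      exact hbits
    · rw [bitsArg_def, w_rsi]
      decide
  -- the returned state (0x11649c)
  v_after_call w_rsp_116497 w_mem_116497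
  simp only [w_rdi_116497, hfn] at w_same
  have hs : Mem.SameExcept [⟨g.R - 360, g.R⟩, ⟨g.f + 48, g.f + 56⟩, ⟨g.f + 84, g.f + 96⟩, ⟨g.f + 136, g.f + 144⟩,
      ⟨g.f + 1484, g.f + 1749⟩, ⟨g.f + 1752, g.f + 1784⟩] v.mem s_116497r.mem := by
    u_same
  have hws : ∀ w, w ∈ [(⟨g.R - 360, g.R⟩ : Span), ⟨g.f + 48, g.f + 56⟩, ⟨g.f + 84, g.f + 96⟩, ⟨g.f + 136, g.f + 144⟩,
      ⟨g.f + 1484, g.f + 1749⟩, ⟨g.f + 1752, g.f + 1784⟩] → MapWin g Ai A (mapAt g v.mem i) w := by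
    intro w hw
    simp only [List.mem_cons, List.mem_nil_iff, or_false] at hw
    unfold MapWin
    rcases hw with rfl | rfl | rfl | rfl | rfl | rfl
    · left
      simp only []
      omega
    · right; right; right; right; left
      simp only []
      omega
    · right; right; right; right; left
      simp only []
      omega
    · right; right; right; right; right; left
      simp only []
      omega
    · right; right; right; right; right; right; left
      simp only []
      omega
    · right; right; right; right; right; right; right; left
      simp only []
      omega
  have hpost : GetBitsSpecPost (g.Blk A) g.len (s_116497.reg .rdi).toNat (bitsArg s_116497) s_116497 s_116497r := w_post
  rw [w_rdi_116497, hfn] at hpost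
  have hun : ShadowUntouched v.mem s_116497r.mem := by v_untouched
  have hl' : MapLoop u₀ g Vorbis.L.start_decoder.cut306 i A7 A7c Ai A s_116497r :=
    hl.carry hcur.lt hs hun hws hpost.bits.bits w_rip w_rsp (Vorbis.conv_code_eqOn w_code) w_inv (by rw [w_kept.get .rbp rfl])
  obtain ⟨ecount, _, emap, echn, _⟩ := hl.fields_eq hcur.lt hs hws
  have hobj := hl.objEq hcur.lt hs hws
  -- no window of a reader call meets the arena's buffer: every range inside it reads the same
  have p11 := hp.ar_stack
  have p7 := hp.objOut
  have harena : ∀ lo hi : Nat, A.1.B ≤ lo → hi ≤ A.1.B + A.1.L → Mem.EqOn lo hi v.mem s_116497r.mem := by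
    intro lo hi q1 q2
    apply hs.eqOn
    intro w hw
    simp only [List.mem_cons, List.mem_nil_iff, or_false] at hw
    rcases hw with rfl | rfl | rfl | rfl | rfl | rfl <;> simp only [] <;> omega
  -- the record `m(i)` and its `chan` block lie inside the arena's buffer
  obtain ⟨_, hT1, hT2⟩ := hl.table
  have h1 := hl.maps.MP1
  have hlt := hcur.lt
  have p10 := hp.ar_hi
  have em : mapAt g v.mem i = stb_vorbis.mapping v.mem g.f + 56 * i := rfl
  have hrec : Mem.EqOn (mapAt g v.mem i) (mapAt g v.mem i + 56) v.mem s_116497r.mem :=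
    harena _ _ (by omega) (by omega)
  have hCin := arena_inside hm.arena hcur.MP2.1
  simp only [] at hCin
  have hchan : (Block.mk (Mapping.chan v.mem (mapAt g v.mem i)) (Off.sizeof.MappingChannel * nchan v.mem g.f)).Kept
      v.mem s_116497r.mem := by
    apply Block.Kept.of_sameExcept hs
    · intro w hw
      simp only [List.mem_cons, List.mem_nil_iff, or_false] at hw
      rcases hw with rfl | rfl | rfl | rfl | rfl | rfl <;> simp only [] <;> omega
    · simp only []
      omega
  have hcur' : MapCur g (Since Ai A.1) s_116497r.mem i 12 :=
    hcur.carry ecount emap echn (hrec.mono (Nat.le_refl _) (by omega)) (by omega) (fun _ => hchan)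
  have e_sub : Mapping.submaps s_116497r.mem (mapAt g v.mem i) = Mapping.submaps v.mem (mapAt g v.mem i) := by
    simp only [vacc, voff]
    exact hrec.u8 _ (by omega) (by omega) (by omega)
  have h3 := hcur.MP3
  have hjl := hpt.j_le
  have hdone : ∀ s : Nat, s < j → Mapping.SubmapOK s_116497r.mem g.f (mapAt g s_116497r.mem i) s := by
    intro s hs'
    rw [emap]
    have hold := hpt.done s hs'
    have ef : Mapping.submap_floor s_116497r.mem (mapAt g v.mem i) s = Mapping.submap_floor v.mem (mapAt g v.mem i) s := by
      simp only [vacc, voff]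
      exact hrec.u8 _ (by omega) (by omega) (by omega)
    have er : Mapping.submap_residue s_116497r.mem (mapAt g v.mem i) s =
        Mapping.submap_residue v.mem (mapAt g v.mem i) s := by
      simp only [vacc, voff]
      exact hrec.u8 _ (by omega) (by omega) (by omega)
    have efc : stb_vorbis.floor_count s_116497r.mem g.f = stb_vorbis.floor_count v.mem g.f := by
      simp only [vacc, voff]
      exact hobj.i32 176 (by decide)
    have erc : stb_vorbis.residue_count s_116497r.mem g.f = stb_vorbis.residue_count v.mem g.f := by
      simp only [vacc, voff]
      exact hobj.i32 320 (by decide)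
    unfold Mapping.SubmapOK at hold ⊢
    rw [ef, er, efc, erc]
    exact hold
  have hin : InR12 u₀ g Vorbis.L.start_decoder.cut306 i j A7 A7c Ai A s_116497r :=
    { loop := hl'
      rbx := by
        rw [emap, w_kept.get .rbx rfl]
        exact hpt.rbx
      cur := hcur'
      r13 := by
        rw [w_kept.get .r13 rfl]
        exact hpt.r13
      j_le := by
        rw [emap, e_sub]
        exact hpt.j_le
      done := hdone }
  refine ReachVia.done ⟨A7, A7c, Ai, A, hin, ?_⟩
  rw [emap, e_sub]
  exact hb.j_lt

end Vorbis.Spec.start_decoder_R12b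

/-- The unit `start_decoder.R12b`: `segR12b_walk` at every entry state. -/
theorem Vorbis.Spec.Worked.start_decoder_R12b_ok : Vorbis.Spec.start_decoder_R12b.Statement := by
  intro Lay hLay μ hμ u₀ hcode h_get_bits g i j v hat
  obtain ⟨A7, A7c, Ai, A, hb⟩ := hat
  exact Vorbis.Spec.start_decoder_R12b.segR12b_walk hLay hμ hcode h_get_bits hb
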